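-- pv_equiv track=rewrite | github.com/CubeVic/Twitch_Home_Test | twitch_test/utils.py | clean_user_name
-- ===== SOURCE A (Python) =====
-- def clean_user_name(string_to_clean):
-- 	name = []
-- 	for c in string_to_clean:
-- 		if c == "_":
-- 			name.append(c)
-- 		elif c.isascii() and c.isalnum():
-- 			name.append(c)
-- 	return "".join(name)
-- ===== SOURCE B (Python) =====
-- import re
--
-- def clean_user_name(string_to_clean):
--     return re.sub(r'\W', '', string_to_clean, flags=re.ASCII)
-- ===== Notes on version B (the rewrite author's own statement) =====
-- stated objective: idiomatic
-- what changed: Replaced the explicit per-character append loop with a single regex substitution deleting ASCII non-word characters (re.sub of \W with the empty replacement under re.ASCII), a compiled-automaton scan in C instead of a Python-level loop.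
import Mathlib
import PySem

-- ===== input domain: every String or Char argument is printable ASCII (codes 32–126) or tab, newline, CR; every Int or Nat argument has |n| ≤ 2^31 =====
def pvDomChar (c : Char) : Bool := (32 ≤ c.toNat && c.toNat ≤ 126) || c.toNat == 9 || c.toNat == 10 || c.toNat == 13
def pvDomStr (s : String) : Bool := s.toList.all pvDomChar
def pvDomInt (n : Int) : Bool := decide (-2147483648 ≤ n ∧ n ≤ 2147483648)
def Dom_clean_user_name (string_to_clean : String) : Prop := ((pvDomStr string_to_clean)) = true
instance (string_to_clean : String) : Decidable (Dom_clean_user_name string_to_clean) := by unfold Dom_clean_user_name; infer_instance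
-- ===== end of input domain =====

-- B replaces A's per-character append loop by a single regex-style deletion (re.sub of \W
-- under re.ASCII) of every character outside [A-Za-z0-9_] — more idiomatic, same O(n) cost.

-- ===== PORT A =====
-- A: loop over the characters, appending '_' and ASCII alphanumerics to an accumulator list, then join.
def clean_user_name (string_to_clean : String) : String :=
  String.mk
    (string_to_clean.toList.foldl
      (fun name c =>
        if c == '_' then name ++ [c]
        else if decide (c.toNat ≤ 127) && PySem.Chars.isalnum c then name ++ [c]
        else name)
      [])

-- ===== PORT B =====
-- B: re.sub(r'\W', '', s, flags=re.ASCII) — delete every character outside the ASCII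
-- word class [A-Za-z0-9_]; ported as a filter by that word-class predicate.
def pvAsciiWordChar (c : Char) : Bool :=
  ('a' ≤ c && c ≤ 'z') || ('A' ≤ c && c ≤ 'Z') || ('0' ≤ c && c ≤ '9') || c == '_'

def clean_user_name_alt (string_to_clean : String) : String :=
  String.mk (string_to_clean.toList.filter pvAsciiWordChar)

-- ===== PRECONDITION & SPEC =====
def Spec_clean_user_name (string_to_clean : String) (out : String) : Prop := out = clean_user_name_alt string_to_clean
instance (string_to_clean : String) (out : String) : Decidable (Spec_clean_user_name string_to_clean out) := by unfold Spec_clean_user_name; infer_instance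

-- ===== CLAIM (what is proved, stated in full; the proofs are below) =====
def Claim_equal_clean_user_name : Prop := ∀ (string_to_clean : String), Dom_clean_user_name string_to_clean → Spec_clean_user_name string_to_clean (clean_user_name string_to_clean)

-- ===== LEMMAS AND PROOFS =====

-- A's per-character test agrees with the ASCII word-class predicate on every Char.
theorem pvPred_eq (c : Char) :
    (c == '_' || (decide (c.toNat ≤ 127) && PySem.Chars.isalnum c)) = pvAsciiWordChar c := by
  have hle : ∀ a b : Char, (a ≤ b) ↔ a.toNat ≤ b.toNat := by
    intro a b
    rw [Char.le_def, UInt32.le_iff_toNat_le]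
    rfl
  have h95 : (c = '_') ↔ c.toNat = 95 := eq_iff_eq_of_cmp_eq_cmp rfl
  rw [Bool.eq_iff_iff]
  simp only [pvAsciiWordChar, PySem.Chars.isalnum, PySem.Chars.isalpha, PySem.Chars.isdigit,
    PySem.Chars.isupper, PySem.Chars.islower, Bool.or_eq_true, Bool.and_eq_true,
    beq_iff_eq, decide_eq_true_iff, h95, hle]
  have e1 : ('a' : Char).toNat = 97 := rfl
  have e2 : ('z' : Char).toNat = 122 := rfl
  have e3 : ('A' : Char).toNat = 65 := rfl
  have e4 : ('Z' : Char).toNat = 90 := rfl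
  have e5 : ('0' : Char).toNat = 48 := rfl
  have e6 : ('9' : Char).toNat = 57 := rfl
  rw [e1, e2, e3, e4, e5, e6]
  omega

-- A's loop body, rewritten as a single filter-shaped conditional append.
theorem pvBody_eq :
    (fun (name : List Char) (c : Char) =>
      if c == '_' then name ++ [c]
      else if decide (c.toNat ≤ 127) && PySem.Chars.isalnum c then name ++ [c]
      else name)
    = (fun (name : List Char) (c : Char) => if pvAsciiWordChar c then name ++ [c] else name) := by
  funext name c
  rw [← pvPred_eq c]
  by_cases h1 : (c == '_') = true
  · simp [h1]
  · by_cases h2 : (decide (c.toNat ≤ 127) && PySem.Chars.isalnum c) = true <;>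
      simp [h1, h2]

-- A's accumulator loop is the filter.
theorem pvFoldl_filter (l : List Char) (acc : List Char) :
    l.foldl
      (fun name c =>
        if c == '_' then name ++ [c]
        else if decide (c.toNat ≤ 127) && PySem.Chars.isalnum c then name ++ [c]
        else name)
      acc = acc ++ l.filter pvAsciiWordChar := by
  rw [pvBody_eq]
  exact PySem.List.foldl_append_if_eq_filter pvAsciiWordChar l acc

-- ===== VERDICT (by name: the statement is the Claim_ definition above) =====
theorem clean_user_name_spec : Claim_equal_clean_user_name := by
  intro s _
  unfold Spec_clean_user_name clean_user_name clean_user_name_alt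
  rw [pvFoldl_filter]
  simp
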